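-- pv_equiv track=rewrite | github.com/mattrwyrick/autodocs_demo | src/autodocs/advanced_views/logic/CSV_logic.py | replace_text_params_with_data
-- ===== SOURCE A (Python) =====
-- def replace_text_params_with_data(text, row_number, data, column_mapping):
--     text = "!" + text.replace("ROW#", str(row_number))
--     text_array = text.split("CSV")
--     for index, text in enumerate(text_array):
--         if text.startswith("["):
--             data_index, extra_text = get_index_from_text(text, column_mapping)
--             parameter = get_data_parameter(data_index, data)
--             text_array[index] = parameter + extra_text
--     return "".join(text_array)[1:]
--
-- def get_index_from_text(text, column_mapping):
--     text_length = len(text)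
--     for index, char in enumerate(text):
--         if char == "]":
--             data_index = text[1:index]
--             data_index = column_mapping[data_index] if data_index in column_mapping else int(data_index)
--             extra_text = "" if (index+1) == text_length else text[index+1:]
--             return data_index, extra_text
--     return -1, text
--
-- def get_data_parameter(index, data):
--     if index == -1:
--         return ""
--     return data[index]
-- ===== SOURCE B (Python) =====
-- def replace_text_params_with_data(text, row_number, data, column_mapping):
--     s = text.replace("ROW#", str(row_number))
--     out = []
--     i = 0
--     while True:
--         k = s.find("CSV", i)
--         if k == -1:
--             out.append(s[i:])
--             return "".join(out)
--         out.append(s[i:k])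
--         i = k + 3
--         if s.startswith("[", i):
--             j = s.find("]", i + 1)
--             m = s.find("CSV", i + 1)
--             if j != -1 and (m == -1 or j < m):
--                 tok = s[i + 1:j]
--                 idx = column_mapping[tok] if tok in column_mapping else int(tok)
--                 out.append("" if idx == -1 else data[idx])
--                 i = j + 1
-- ===== Notes on version B (the rewrite author's own statement) =====
-- stated objective: alternative
-- what changed: A prepends a '!' sentinel, splits the text into an array on 'CSV', rewrites the bracketed chunks in place via helper functions and joins the array back; B makes one left-to-right pass with str.find, jumping from one 'CSV' occurrence to the next and emitting the substituted value (or the stripped chunk) directly into an output buffer, with no sentinel, no chunk array and no join-then-slice.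
import Mathlib
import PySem

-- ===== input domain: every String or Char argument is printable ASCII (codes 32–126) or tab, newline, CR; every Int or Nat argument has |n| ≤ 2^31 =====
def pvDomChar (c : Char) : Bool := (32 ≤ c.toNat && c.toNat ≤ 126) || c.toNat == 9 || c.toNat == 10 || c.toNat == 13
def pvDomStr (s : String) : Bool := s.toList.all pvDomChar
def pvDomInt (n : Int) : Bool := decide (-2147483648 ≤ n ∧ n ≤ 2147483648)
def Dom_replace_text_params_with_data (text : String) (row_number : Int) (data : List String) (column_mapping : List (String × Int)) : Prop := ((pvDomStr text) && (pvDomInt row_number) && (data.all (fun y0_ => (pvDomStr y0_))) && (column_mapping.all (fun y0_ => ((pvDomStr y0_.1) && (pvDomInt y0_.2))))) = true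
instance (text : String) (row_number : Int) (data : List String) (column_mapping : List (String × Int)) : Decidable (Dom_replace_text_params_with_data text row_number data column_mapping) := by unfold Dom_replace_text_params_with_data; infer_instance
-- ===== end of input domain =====

-- B replaces A's split-into-chunks / rewrite-chunk-array / join pipeline by a single left-to-right
-- scan that jumps between "CSV" occurrences and substitutes in place (objective: alternative).

-- the separator / token marker "CSV"
def pvCSV : List Char := ['C', 'S', 'V']

-- 'column_mapping[t] if t in column_mapping else int(t)' (identical expression in both Pythons)
def pvLookupOrInt (column_mapping : List (String × Int)) (tok : List Char) : Option Int :=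
  match List.lookup (String.ofList tok) column_mapping with
  | some v => some v
  | none => PySem.Int.ofChars? tok

-- ===== PORT A =====

-- the 'for index, char in enumerate(text)' loop of get_index_from_text
def pvGiftLoop (column_mapping : List (String × Int)) (orig : List Char) :
    List Char → Nat → Option (Int × List Char)
  | [], _ => some (-1, orig)
  | c :: rest, index =>
    if c = ']' then
      (pvLookupOrInt column_mapping (PySem.List.slice orig (some 1) (some (index : Int)))).bind
        fun di =>
          some (di, if index + 1 = orig.length then [] else PySem.List.slice orig (some ((index : Int) + 1)) none)
    else pvGiftLoop column_mapping orig rest (index + 1)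

def pv_get_index_from_text (column_mapping : List (String × Int)) (chunk : List Char) :
    Option (Int × List Char) :=
  pvGiftLoop column_mapping chunk chunk 0

def pv_get_data_parameter (index : Int) (data : List String) : Option (List Char) :=
  if index = -1 then some [] else (PySem.List.pyGet? data index).map String.toList

-- 'for index, text in enumerate(text_array): if text.startswith("["): text_array[index] = …'
def pvProcessChunks (column_mapping : List (String × Int)) (data : List String) :
    List (List Char) → Option (List (List Char))
  | [] => some []
  | chunk :: rest =>
    (if PySem.Chars.startswith chunk ['['] then
       (pv_get_index_from_text column_mapping chunk).bind fun pr =>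
         (pv_get_data_parameter pr.1 data).map fun p => p ++ pr.2
     else some chunk).bind fun chunk' =>
      (pvProcessChunks column_mapping data rest).map fun rest' => chunk' :: rest'

def replace_text_params_with_data (text : String) (row_number : Int) (data : List String) (column_mapping : List (String × Int)) : String :=
  let t : List Char := '!' :: PySem.Chars.replace text.toList "ROW#".toList (PySem.Int.toChars row_number)
  match pvProcessChunks column_mapping data (PySem.Chars.splitOn t pvCSV) with
  | some parts => String.ofList (PySem.List.slice (PySem.Chars.join [] parts) (some 1) none)
  | none => ""   -- the Python raised (ValueError/IndexError); excluded by Pre_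

-- ===== PORT B =====

-- substitute one bracketed token
def pvSubstTok (data : List String) (column_mapping : List (String × Int)) (tok : List Char) :
    Option (List Char) :=
  (pvLookupOrInt column_mapping tok).bind fun idx =>
    if idx = -1 then some [] else (PySem.List.pyGet? data idx).map String.toList

-- the scan loop of Source B: find next "CSV", substitute a valid bracketed token, repeat
-- (the fuel argument is only a totality guard: every step consumes at least one character)
def pvScan (data : List String) (column_mapping : List (String × Int)) :
    Nat → List Char → Option (List Char)
  | 0, s => some s
  | fuel + 1, s =>
    if PySem.Chars.find s pvCSV = -1 then some s
    else
      let kn := (PySem.Chars.find s pvCSV).toNat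
      let rest := s.drop (kn + 3)
      if PySem.Chars.startswith rest ['['] then
        let t := rest.drop 1
        let j := PySem.Chars.find t [']']
        let m := PySem.Chars.find t pvCSV
        if ¬ j = -1 ∧ (m = -1 ∨ j < m) then
          (pvSubstTok data column_mapping (t.take j.toNat)).bind fun v =>
            (pvScan data column_mapping fuel (t.drop (j.toNat + 1))).map fun r =>
              s.take kn ++ v ++ r
        else (pvScan data column_mapping fuel rest).map fun r => s.take kn ++ r
      else (pvScan data column_mapping fuel rest).map fun r => s.take kn ++ r

def replace_text_params_with_data_alt (text : String) (row_number : Int) (data : List String) (column_mapping : List (String × Int)) : String :=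
  let u := PySem.Chars.replace text.toList "ROW#".toList (PySem.Int.toChars row_number)
  match pvScan data column_mapping (u.length + 1) u with
  | some r => String.ofList r
  | none => ""   -- the Python raised; excluded by Pre_

-- ===== PRECONDITION & SPEC =====

def pvTokOk (data : List String) (column_mapping : List (String × Int)) (tok : List Char) : Bool :=
  match pvLookupOrInt column_mapping tok with
  | none => false
  | some idx => idx == -1 || (PySem.List.pyGet? data idx).isSome

-- Pre_ excludes exactly the inputs on which the Python raises: a substituted token that is neither a
-- column_mapping key nor parseable by int() (ValueError), or one whose index is out of range (IndexError).
def pvU (text : String) (row_number : Int) : List Char :=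
  PySem.Chars.replace text.toList "ROW#".toList (PySem.Int.toChars row_number)

-- (p, j) is a substitution site of u: a "CSV[" at p whose first "]" is at j, with no other "]"
-- and no further "CSV" occurrence strictly between the "[" and that "]"
def pvSite (u : List Char) (p j : Nat) : Bool :=
  pvCSV.isPrefixOf (u.drop p) &&
  ((u.drop (p + 3)).take 1 == ['[']) &&
  decide (p + 4 ≤ j) &&
  ((u.drop j).take 1 == [']']) &&
  !((u.drop (p + 4)).take (j - (p + 4))).contains ']' &&
  (List.range' (p + 4) (j - (p + 4))).all fun q => !pvCSV.isPrefixOf (u.drop q)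

-- Pre_ excludes exactly the inputs on which the Python raises: a substituted token that is neither a
-- column_mapping key nor parseable by int() (ValueError), or whose index is out of range (IndexError).
def Pre_replace_text_params_with_data (text : String) (row_number : Int) (data : List String) (column_mapping : List (String × Int)) : Prop :=
  ((List.range (pvU text row_number).length).all fun p =>
    (List.range (pvU text row_number).length).all fun j =>
      !pvSite (pvU text row_number) p j ||
        pvTokOk data column_mapping
          (((pvU text row_number).drop (p + 4)).take (j - (p + 4)))) = true

instance (text : String) (row_number : Int) (data : List String) (column_mapping : List (String × Int)) : Decidable (Pre_replace_text_params_with_data text row_number data column_mapping) := by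
  unfold Pre_replace_text_params_with_data; infer_instance

def pvWitness_replace_text_params_with_data : String × Int × List String × (List (String × Int)) :=
  ("aCSV[0]b", 7, ["x"], [("k", 1)])

def Spec_replace_text_params_with_data (text : String) (row_number : Int) (data : List String) (column_mapping : List (String × Int)) (out : String) : Prop := out = replace_text_params_with_data_alt text row_number data column_mapping
instance (text : String) (row_number : Int) (data : List String) (column_mapping : List (String × Int)) (out : String) : Decidable (Spec_replace_text_params_with_data text row_number data column_mapping out) := by unfold Spec_replace_text_params_with_data; infer_instance

-- ===== CLAIM (what is proved, stated in full; the proofs are below) =====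
def Claim_equal_replace_text_params_with_data : Prop := ∀ (text : String) (row_number : Int) (data : List String) (column_mapping : List (String × Int)), Dom_replace_text_params_with_data text row_number data column_mapping → Pre_replace_text_params_with_data text row_number data column_mapping → Spec_replace_text_params_with_data text row_number data column_mapping (replace_text_params_with_data text row_number data column_mapping)

-- ===== LEMMAS AND PROOFS =====
theorem pvFind_bound (s sub : List Char) (h : ¬ PySem.Chars.find s sub = -1) :
    0 ≤ PySem.Chars.find s sub ∧ (PySem.Chars.find s sub).toNat + sub.length ≤ s.length := by
  have h0 : -1 ≤ PySem.Chars.find s sub := PySem.Chars.neg_one_le_find s sub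
  have hle : PySem.Chars.find s sub ≤ s.length := PySem.Chars.find_le_length s sub
  have hnn : 0 ≤ PySem.Chars.find s sub := by omega
  refine ⟨hnn, ?_⟩
  have := (PySem.Chars.find_spec hnn).1
  have hl := this.length_le
  simp [List.length_drop] at hl
  omega

-- proof-side functional model of Python's str.split("CSV") (accumulator-free form of Chars.splitOn.go)
def pvS (pre : List Char) : List Char → List (List Char)
  | [] => [pre]
  | c :: rest =>
    if pvCSV.isPrefixOf (c :: rest) then pre :: pvS [] ((c :: rest).drop 3)
    else pvS (pre ++ [c]) rest
termination_by l => l.length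
decreasing_by
  · simp
  · simp

theorem pvSplitOn_go_eq (fuel : Nat) : ∀ (l cur : List Char) (acc : List (List Char)),
    l.length ≤ fuel →
    PySem.Chars.splitOn.go pvCSV fuel l cur acc = acc.reverse ++ pvS cur.reverse l := by
  induction fuel with
  | zero =>
    intro l cur acc h
    have hl : l = [] := by cases l <;> simp_all
    subst hl
    rw [PySem.Chars.splitOn.go.eq_def]
    simp [pvS]
  | succ fuel ih =>
    intro l cur acc h
    rw [PySem.Chars.splitOn.go.eq_def]
    cases l with
    | nil => simp [pvS]
    | cons c rest =>
      by_cases hp : pvCSV.isPrefixOf (c :: rest) = true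
      · simp only [hp, if_pos]
        rw [ih ((c :: rest).drop pvCSV.length) [] (cur.reverse :: acc)
            (by simp [pvCSV] at h ⊢; omega)]
        have hs : pvS cur.reverse (c :: rest) = cur.reverse :: pvS [] ((c :: rest).drop 3) := by
          rw [pvS]; simp only [hp, if_pos]
        rw [hs]
        simp [pvCSV]
      · simp only [hp, if_neg, Bool.false_eq_true, not_false_iff]
        rw [ih rest (c :: cur) acc (by simp at h; omega)]
        simp [pvS, hp]

theorem pvSplitOn_eq (l : List Char) :
    PySem.Chars.splitOn l pvCSV = pvS [] l := by
  show PySem.Chars.splitOn.go pvCSV (l.length + 1) l [] [] = pvS [] l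
  rw [pvSplitOn_go_eq (l.length + 1) l [] [] (by omega)]
  simp

theorem pvS_cons (l : List Char) :
    ∀ pre, pvS pre l = (pre ++ (pvS [] l).headI) :: (pvS [] l).tail := by
  induction l with
  | nil => intro pre; simp [pvS]
  | cons c rest ih =>
    intro pre
    by_cases hp : pvCSV.isPrefixOf (c :: rest) = true
    · rw [pvS, pvS, if_pos hp, if_pos hp]
      simp
    · rw [pvS, pvS, if_neg hp, if_neg hp]
      rw [ih (pre ++ [c]), show ([] : List Char) ++ [c] = [c] from rfl, ih [c]]
      simp

theorem pvS_no (l : List Char) (h : ∀ p, ¬ pvCSV <+: l.drop p) :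
    ∀ pre, pvS pre l = [pre ++ l] := by
  induction l with
  | nil => intro pre; simp [pvS]
  | cons c rest ih =>
    intro pre
    have hp : pvCSV.isPrefixOf (c :: rest) = false := by
      rw [Bool.eq_false_iff]
      intro hcon
      exact h 0 (by simpa using (List.isPrefixOf_iff_prefix).1 hcon)
    rw [pvS]
    simp only [hp, Bool.false_eq_true, if_neg, not_false_iff]
    rw [ih (fun p => by simpa using h (p + 1)) (pre ++ [c])]
    simp

theorem pvS_first (k : Nat) : ∀ (l : List Char), pvCSV <+: l.drop k →
    (∀ p < k, ¬ pvCSV <+: l.drop p) →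
    ∀ pre, pvS pre l = (pre ++ l.take k) :: pvS [] (l.drop (k + 3)) := by
  induction k with
  | zero =>
    intro l hocc _ pre
    simp only [List.drop_zero] at hocc
    obtain ⟨r, hr⟩ := hocc
    subst hr
    show pvS pre ('C' :: 'S' :: 'V' :: r) = _ :: _
    rw [pvS, if_pos (by simp [List.isPrefixOf_iff_prefix, pvCSV])]
    simp [pvCSV]
  | succ k ih =>
    intro l hocc hmin pre
    cases l with
    | nil => simp at hocc; exact absurd hocc (by simp [pvCSV])
    | cons c rest =>
      have hp : pvCSV.isPrefixOf (c :: rest) = false := by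
        rw [Bool.eq_false_iff]
        intro hcon
        exact hmin 0 (by omega) (by simpa using (List.isPrefixOf_iff_prefix).1 hcon)
      rw [pvS]
      simp only [hp, Bool.false_eq_true, if_neg, not_false_iff]
      rw [ih rest (by simpa using hocc)
          (fun p hpk => by simpa using hmin (p + 1) (by omega)) (pre ++ [c])]
      simp
-- gift loop characterisations
theorem pvGiftLoop_no (cm : List (String × Int)) (orig : List Char) :
    ∀ suffix, ']' ∉ suffix → ∀ i, pvGiftLoop cm orig suffix i = some (-1, orig) := by
  intro suffix
  induction suffix with
  | nil => intro _ i; rfl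
  | cons c rest ih =>
    intro h i
    rw [pvGiftLoop, if_neg (by simp at h; exact fun hq => h.1 hq.symm)]
    exact ih (by simp at h; exact h.2) (i + 1)

theorem pvTailTake (l : List Char) (n : Nat) : (l.take (n + 1)).tail = l.tail.take n := by
  induction l <;> simp

theorem pvSliceTake (orig : List Char) (i : Nat) :
    PySem.List.slice orig (some 1) (some (i : Int)) = (orig.take i).drop 1 := by
  simp [pysem]
  cases i with
  | zero => simp
  | succ n => rw [pvTailTake]; simp

theorem pvSliceFrom (orig : List Char) (n : Nat) :
    PySem.List.slice orig (some (n : Int)) none = orig.drop n := by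
  simp [pysem]

theorem pvTakeLenEq (orig mid : List Char) (i : Nat) (h : orig.take i ++ mid = orig)
    (hm : mid ≠ []) : (orig.take i).length = i := by
  by_cases hle : i ≤ orig.length
  · simp [List.length_take, hle]
  · exfalso
    have ht : orig.take i = orig := List.take_of_length_le (by omega)
    rw [ht] at h
    have := congrArg List.length h
    simp at this
    exact hm this

theorem pvGiftLoop_yes (cm : List (String × Int)) (orig : List Char) :
    ∀ a b (i : Nat), ']' ∉ a → orig.take i ++ a ++ ']' :: b = orig →
      pvGiftLoop cm orig (a ++ ']' :: b) i =
        (pvLookupOrInt cm ((orig.take (i + a.length)).drop 1)).bind fun di => some (di, b) := by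
  intro a
  induction a with
  | nil =>
    intro b i _ horig
    simp only [List.nil_append, List.append_nil] at horig ⊢
    have hlen : (orig.take i).length = i := pvTakeLenEq orig _ i horig (by simp)
    rw [pvGiftLoop, if_pos rfl]
    rw [pvSliceTake]
    have hdrop : orig.drop (i + 1) = b := by
      conv_lhs => rw [← horig]
      rw [List.drop_append]
      simp [hlen]
    have hlenall : orig.length = i + 1 + b.length := by
      conv_lhs => rw [← horig]
      simp [hlen]; omega
    by_cases hend : i + 1 = orig.length
    · have hb : b = [] := by
        rw [← hend] at hlenall
        simpa using (by omega : b.length = 0)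
      simp [hend, hb]
    · have hcast : ((i : Int) + 1) = ((i + 1 : Nat) : Int) := by push_cast; ring
      rw [if_neg hend, hcast, pvSliceFrom, hdrop]
      simp
  | cons c a' ih =>
    intro b i hc horig
    have hcne : ¬ c = ']' := by simp at hc; exact fun h => hc.1 h.symm
    simp only [List.cons_append] at horig ⊢
    have horig2 : orig.take i ++ c :: (a' ++ ']' :: b) = orig := by simpa using horig
    rw [pvGiftLoop, if_neg hcne]
    have hlen : (orig.take i).length = i := pvTakeLenEq orig _ i horig2 (by simp)
    have htake : orig.take (i + 1) = orig.take i ++ [c] := by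
      conv_lhs => rw [← horig2]
      rw [List.take_append]
      rw [List.take_of_length_le (by omega), hlen]
      simp
    have horig' : orig.take (i + 1) ++ a' ++ ']' :: b = orig := by
      rw [htake]
      simpa using horig2
    rw [ih b (i + 1) (by simp at hc; exact hc.2) horig']
    have harith : i + 1 + a'.length = i + (c :: a').length := by simp; omega
    rw [harith]

-- the per-chunk transformation of A's loop
def pvChunkA (cm : List (String × Int)) (data : List String) (chunk : List Char) : Option (List Char) :=
  if PySem.Chars.startswith chunk ['['] then
    (pv_get_index_from_text cm chunk).bind fun pr =>
      (pv_get_data_parameter pr.1 data).map fun p => p ++ pr.2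
  else some chunk

theorem pvProcessChunks_cons (cm : List (String × Int)) (data : List String)
    (chunk : List Char) (rest : List (List Char)) :
    pvProcessChunks cm data (chunk :: rest) =
      (pvChunkA cm data chunk).bind fun chunk' =>
        (pvProcessChunks cm data rest).map fun rest' => chunk' :: rest' := by
  rfl

theorem pvChunkA_not_lb (cm : List (String × Int)) (data : List String) (chunk : List Char)
    (h : PySem.Chars.startswith chunk ['['] = false) : pvChunkA cm data chunk = some chunk := by
  simp [pvChunkA, h]

theorem pvChunkA_no_close (cm : List (String × Int)) (data : List String) (t : List Char)
    (h : ']' ∉ t) : pvChunkA cm data ('[' :: t) = some ('[' :: t) := by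
  unfold pvChunkA
  rw [if_pos (show PySem.Chars.startswith ('[' :: t) ['['] = true from
    (PySem.Chars.startswith_iff _ _).2 ⟨t, rfl⟩)]
  unfold pv_get_index_from_text
  rw [pvGiftLoop_no cm ('[' :: t) ('[' :: t) (by simp [h]) 0]
  simp [pv_get_data_parameter]

theorem pvChunkA_close (cm : List (String × Int)) (data : List String) (a b : List Char)
    (h : ']' ∉ a) :
    pvChunkA cm data ('[' :: (a ++ ']' :: b)) =
      (pvSubstTok data cm a).bind fun v => some (v ++ b) := by
  unfold pvChunkA
  rw [if_pos (show PySem.Chars.startswith ('[' :: (a ++ ']' :: b)) ['['] = true from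
    (PySem.Chars.startswith_iff _ _).2 ⟨a ++ ']' :: b, rfl⟩)]
  unfold pv_get_index_from_text
  have hg := pvGiftLoop_yes cm ('[' :: (a ++ ']' :: b)) ('[' :: a) b 0
      (by simp [h]) (by simp)
  rw [show ('[' :: a) ++ ']' :: b = '[' :: (a ++ ']' :: b) from by simp] at hg
  rw [hg]
  have htok : ((('[' :: (a ++ ']' :: b)).take (0 + ('[' :: a).length)).drop 1) = a := by
    simp
  rw [htok]
  cases hlk : pvLookupOrInt cm a with
  | none => simp [pvSubstTok, hlk]
  | some di =>
    simp only [pvSubstTok, hlk, Option.bind_some]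
    by_cases hdi : di = -1
    · simp [pv_get_data_parameter, hdi]
    · cases hget : PySem.List.pyGet? data di <;>
        simp [pv_get_data_parameter, hdi, hget]

-- singleton prefixes and find-based decompositions
theorem pvSingletonPrefix (x : Char) (l : List Char) : [x] <+: l ↔ ∃ r, l = x :: r := by
  cases l with
  | nil => simp
  | cons c r =>
    constructor
    · intro hp
      obtain ⟨s, hs⟩ := hp
      simp at hs
      exact ⟨r, by rw [hs.1]⟩
    · rintro ⟨r', hr⟩
      rw [hr]
      exact ⟨r', rfl⟩

theorem pvFindNone (t sub : List Char) (h : PySem.Chars.find t sub = -1) :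
    ∀ p, ¬ sub <+: t.drop p := by
  intro p hp
  exact (PySem.Chars.find_eq_neg_one_iff t sub).1 h (hp.isInfix.trans (t.drop_suffix p).isInfix)

theorem pvNotMem_of_find_neg (t : List Char) (x : Char)
    (h : PySem.Chars.find t [x] = -1) : x ∉ t := by
  intro hmem
  obtain ⟨i, hi, hieq⟩ := List.mem_iff_getElem.1 hmem
  refine pvFindNone t [x] h i ?_
  rw [List.drop_eq_getElem_cons hi, hieq]
  exact ⟨_, rfl⟩

theorem pvFindChar (t : List Char) (x : Char) (h : ¬ PySem.Chars.find t [x] = -1) :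
    (PySem.Chars.find t [x]).toNat < t.length ∧
    t = t.take (PySem.Chars.find t [x]).toNat ++ x :: t.drop ((PySem.Chars.find t [x]).toNat + 1) ∧
    x ∉ t.take (PySem.Chars.find t [x]).toNat := by
  have hnn : 0 ≤ PySem.Chars.find t [x] := (pvFind_bound t [x] h).1
  have hb := (pvFind_bound t [x] h).2
  set jn := (PySem.Chars.find t [x]).toNat with hjn
  have hlt : jn < t.length := by simp at hb; omega
  have hspec := PySem.Chars.find_spec hnn
  obtain ⟨r, hr⟩ := (pvSingletonPrefix x (t.drop jn)).1 hspec.1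
  have hget : t[jn] = x := by
    have hdec := List.drop_eq_getElem_cons hlt
    rw [hr] at hdec
    injection hdec with h1 _
    exact h1.symm
  refine ⟨hlt, ?_, ?_⟩
  · conv_lhs => rw [← List.take_append_drop jn t]
    rw [List.drop_eq_getElem_cons hlt, hget]
  · intro hmem
    obtain ⟨i, hi, hieq⟩ := List.mem_iff_getElem.1 hmem
    have hjm : i < jn ∧ i < t.length := by simpa using hi
    have hilen : i < jn := hjm.1
    have hit : i < t.length := hjm.2
    refine hspec.2 i hilen ?_
    rw [List.drop_eq_getElem_cons hit]
    have : t[i] = x := by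
      rw [← hieq]
      simp [List.getElem_take]
    rw [this]
    exact ⟨_, rfl⟩

-- lifting CSV-occurrence facts over a non-'C' head
theorem pvNoOccCons (c : Char) (hc : c ≠ 'C') (t : List Char)
    (h : ∀ p, ¬ pvCSV <+: t.drop p) : ∀ p, ¬ pvCSV <+: (c :: t).drop p := by
  intro p hp
  cases p with
  | zero =>
    simp only [List.drop_zero, pvCSV] at hp
    rw [List.cons_prefix_cons] at hp
    exact hc hp.1.symm
  | succ p => exact h p (by simpa using hp)

theorem pvOccConsMin (c : Char) (hc : c ≠ 'C') (t : List Char) (m : Nat)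
    (hocc : pvCSV <+: t.drop m) (hmin : ∀ p < m, ¬ pvCSV <+: t.drop p) :
    pvCSV <+: (c :: t).drop (m + 1) ∧ ∀ p < m + 1, ¬ pvCSV <+: (c :: t).drop p := by
  refine ⟨by simpa using hocc, ?_⟩
  intro p hp hpre
  cases p with
  | zero =>
    simp only [List.drop_zero, pvCSV] at hpre
    rw [List.cons_prefix_cons] at hpre
    exact hc hpre.1.symm
  | succ p => exact hmin p (by omega) (by simpa using hpre)

-- A's pipeline on a suffix: all chunks substituted / first chunk kept verbatim
def pvKA (cm : List (String × Int)) (data : List String) (l : List Char) : Option (List Char) :=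
  (pvProcessChunks cm data (pvS [] l)).map List.flatten

def pvHA (cm : List (String × Int)) (data : List String) (l : List Char) : Option (List Char) :=
  (pvProcessChunks cm data (pvS [] l).tail).map fun ps => (pvS [] l).headI ++ ps.flatten

theorem pvHA_of_no (cm : List (String × Int)) (data : List String) (l : List Char)
    (h : ∀ p, ¬ pvCSV <+: l.drop p) : pvHA cm data l = some l := by
  unfold pvHA
  rw [pvS_no l h []]
  simp [pvProcessChunks]

theorem pvKA_of_no (cm : List (String × Int)) (data : List String) (l : List Char)
    (h : ∀ p, ¬ pvCSV <+: l.drop p) : pvKA cm data l = pvChunkA cm data l := by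
  unfold pvKA
  rw [pvS_no l h []]
  rw [show ([] : List Char) ++ l = l from rfl]
  rw [pvProcessChunks_cons]
  cases hc : pvChunkA cm data l <;> simp [pvProcessChunks]

theorem pvHA_first (cm : List (String × Int)) (data : List String) (l : List Char) (k : Nat)
    (hocc : pvCSV <+: l.drop k) (hmin : ∀ p < k, ¬ pvCSV <+: l.drop p) :
    pvHA cm data l = (pvKA cm data (l.drop (k + 3))).map (l.take k ++ ·) := by
  unfold pvHA pvKA
  rw [pvS_first k l hocc hmin []]
  cases hp : pvProcessChunks cm data (pvS [] (l.drop (k + 3))) <;> simp [hp]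

theorem pvKA_first (cm : List (String × Int)) (data : List String) (l : List Char) (k : Nat)
    (hocc : pvCSV <+: l.drop k) (hmin : ∀ p < k, ¬ pvCSV <+: l.drop p) :
    pvKA cm data l =
      (pvChunkA cm data (l.take k)).bind fun c' =>
        (pvKA cm data (l.drop (k + 3))).map (c' ++ ·) := by
  unfold pvKA
  rw [pvS_first k l hocc hmin []]
  rw [show ([] : List Char) ++ l.take k = l.take k from rfl]
  rw [pvProcessChunks_cons]
  cases hc : pvChunkA cm data (l.take k) <;>
    cases hp : pvProcessChunks cm data (pvS [] (l.drop (k + 3))) <;> simp [hc, hp]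

theorem pvKA_eq_pvHA (cm : List (String × Int)) (data : List String) (l : List Char)
    (hch : pvChunkA cm data ((pvS [] l).headI) = some ((pvS [] l).headI)) :
    pvKA cm data l = pvHA cm data l := by
  unfold pvKA pvHA
  have hS : pvS [] l = (pvS [] l).headI :: (pvS [] l).tail := by
    have := pvS_cons l []
    simpa using this
  conv_lhs => rw [hS]
  rw [pvProcessChunks_cons, hch]
  cases hp : pvProcessChunks cm data (pvS [] l).tail <;> simp

theorem pvChunkA_headI_of_not_lb (cm : List (String × Int)) (data : List String)
    (l : List Char) (hsw : PySem.Chars.startswith l ['['] = false) :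
    pvChunkA cm data ((pvS [] l).headI) = some ((pvS [] l).headI) := by
  have hnotpre : ∀ k : Nat, PySem.Chars.startswith (l.take k) ['['] = false := by
    intro k
    rw [Bool.eq_false_iff]
    intro hcon
    have := ((PySem.Chars.startswith_iff _ _).1 hcon).trans (List.take_prefix k l)
    rw [Bool.eq_false_iff] at hsw
    exact hsw ((PySem.Chars.startswith_iff _ _).2 this)
  by_cases hf : PySem.Chars.find l pvCSV = -1
  · rw [pvS_no l (pvFindNone l pvCSV hf) []]
    simpa using pvChunkA_not_lb cm data l hsw
  · have hnn : 0 ≤ PySem.Chars.find l pvCSV := (pvFind_bound l pvCSV hf).1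
    have hspec := PySem.Chars.find_spec hnn
    rw [pvS_first (PySem.Chars.find l pvCSV).toNat l hspec.1 hspec.2 []]
    simpa using pvChunkA_not_lb cm data _ (hnotpre _)

theorem pvMainAux (data : List String) (cm : List (String × Int)) :
    ∀ (n : Nat) (l : List Char), l.length < n → pvScan data cm n l = pvHA cm data l := by
  intro n
  induction n with
  | zero => intro l hl; omega
  | succ n ih =>
    intro l hl
    rw [pvScan]
    by_cases hf : PySem.Chars.find l pvCSV = -1
    · rw [if_pos hf]
      rw [pvHA_of_no cm data l (pvFindNone l pvCSV hf)]
    · rw [if_neg hf]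
      have hnn : 0 ≤ PySem.Chars.find l pvCSV := (pvFind_bound l pvCSV hf).1
      have hb := (pvFind_bound l pvCSV hf).2
      have hlen3 : (PySem.Chars.find l pvCSV).toNat + 3 ≤ l.length := by
        simpa [pvCSV] using hb
      have hspec := PySem.Chars.find_spec hnn
      set kn := (PySem.Chars.find l pvCSV).toNat with hkn
      by_cases hsw : PySem.Chars.startswith (l.drop (kn + 3)) ['['] = true
      · rw [if_pos hsw]
        obtain ⟨t, ht⟩ := (pvSingletonPrefix '[' (l.drop (kn + 3))).1
          ((PySem.Chars.startswith_iff _ _).1 hsw)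
        rw [ht]
        have hlt : ('[' :: t).length = l.length - (kn + 3) := by
          rw [← ht]; simp
        have hlent : t.length + 1 ≤ n := by
          have := hlt; simp at this; omega
        simp only [List.drop_succ_cons, List.drop_zero]
        rw [pvHA_first cm data l kn hspec.1 hspec.2, ht]
        by_cases hC : ¬ PySem.Chars.find t [']'] = -1 ∧
            (PySem.Chars.find t pvCSV = -1 ∨ PySem.Chars.find t [']'] < PySem.Chars.find t pvCSV)
        · rw [if_pos hC]
          obtain ⟨hj, hjm⟩ := hC
          obtain ⟨hjlt, ht2, hnoc⟩ := pvFindChar t ']' hj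
          set jn := (PySem.Chars.find t [']']).toNat with hjndef
          have hjnn : 0 ≤ PySem.Chars.find t [']'] := (pvFind_bound t [']'] hj).1
          rw [ih (t.drop (jn + 1)) (by simp; omega)]
          rcases hjm with hm | hm
          · -- no further CSV inside t
            have hnot : ∀ p, ¬ pvCSV <+: t.drop p := pvFindNone t pvCSV hm
            have hnol : ∀ p, ¬ pvCSV <+: ('[' :: t).drop p :=
              pvNoOccCons '[' (by decide) t hnot
            rw [pvKA_of_no cm data ('[' :: t) hnol]
            rw [pvHA_of_no cm data (t.drop (jn + 1))
              (fun p hp => hnot (jn + 1 + p) (by rwa [← List.drop_drop]))]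
            conv_rhs => rw [show ('[' :: t) = '[' :: (t.take jn ++ ']' :: t.drop (jn + 1)) from by
              rw [← ht2]]
            rw [pvChunkA_close cm data (t.take jn) (t.drop (jn + 1)) hnoc]
            cases hs : pvSubstTok data cm (t.take jn) <;> simp [hs]
          · -- a further CSV occurrence inside t, after the "]"
            have hmne : ¬ PySem.Chars.find t pvCSV = -1 := by
              intro hcon; rw [hcon] at hm; omega
            have hmnn : 0 ≤ PySem.Chars.find t pvCSV := (pvFind_bound t pvCSV hmne).1
            have hmspec := PySem.Chars.find_spec hmnn
            set mn := (PySem.Chars.find t pvCSV).toNat with hmndef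
            have hjmn : jn + 1 ≤ mn := by omega
            have hlift := pvOccConsMin '[' (by decide) t mn hmspec.1 hmspec.2
            rw [pvKA_first cm data ('[' :: t) (mn + 1) hlift.1 hlift.2]
            have htake1 : ('[' :: t).take (mn + 1) = '[' :: t.take mn := by simp
            have hdrop1 : ('[' :: t).drop (mn + 1 + 3) = t.drop (mn + 3) := by simp
            rw [htake1, hdrop1]
            -- decompose the head chunk around the first "]"
            have hblen : (t.take jn).length = jn := by
              simp [List.length_take]; omega
            have htkmn : '[' :: t.take mn =
                '[' :: (t.take jn ++ ']' :: (t.drop (jn + 1)).take (mn - jn - 1)) := by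
              congr 1
              conv_lhs => rw [ht2]
              rw [List.take_append, List.take_of_length_le (by omega), hblen]
              congr 1
              rw [show mn - jn = (mn - jn - 1) + 1 from by omega]
              simp
            rw [htkmn]
            rw [pvChunkA_close cm data (t.take jn) _ hnoc]
            -- B side: the scan continues right after the "]"
            have hocc2 : pvCSV <+: (t.drop (jn + 1)).drop (mn - jn - 1) := by
              rw [List.drop_drop, show jn + 1 + (mn - jn - 1) = mn from by omega]
              exact hmspec.1
            have hmin2 : ∀ p < mn - jn - 1, ¬ pvCSV <+: (t.drop (jn + 1)).drop p := by
              intro p hp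
              rw [List.drop_drop]
              exact hmspec.2 (jn + 1 + p) (by omega)
            rw [pvHA_first cm data (t.drop (jn + 1)) (mn - jn - 1) hocc2 hmin2]
            rw [List.drop_drop, show jn + 1 + (mn - jn - 1 + 3) = mn + 3 from by omega]
            cases hs : pvSubstTok data cm (t.take jn) <;>
              cases hk2 : pvKA cm data (t.drop (mn + 3)) <;> simp [hs, hk2]
        · rw [if_neg hC]
          rw [ih ('[' :: t) (by simp at hlt ⊢; omega)]
          rw [pvKA_eq_pvHA cm data ('[' :: t) ?hch]
          case hch =>
            by_cases hm : PySem.Chars.find t pvCSV = -1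
            · -- the whole of '['::t is one chunk, with no "]" inside
              have hj : PySem.Chars.find t [']'] = -1 := by
                by_contra hjne
                exact hC ⟨hjne, Or.inl hm⟩
              have hnot : ∀ p, ¬ pvCSV <+: t.drop p := pvFindNone t pvCSV hm
              rw [pvS_no ('[' :: t) (pvNoOccCons '[' (by decide) t hnot) []]
              simpa using pvChunkA_no_close cm data t (pvNotMem_of_find_neg t ']' hj)
            · -- head chunk '[' :: t.take mn, with no "]" before the next CSV
              have hmnn : 0 ≤ PySem.Chars.find t pvCSV := (pvFind_bound t pvCSV hm).1
              have hmspec := PySem.Chars.find_spec hmnn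
              set mn := (PySem.Chars.find t pvCSV).toNat with hmndef
              have hlift := pvOccConsMin '[' (by decide) t mn hmspec.1 hmspec.2
              rw [pvS_first (mn + 1) ('[' :: t) hlift.1 hlift.2 []]
              have hnomem : ']' ∉ t.take mn := by
                intro hmem
                by_cases hj : PySem.Chars.find t [']'] = -1
                · exact pvNotMem_of_find_neg t ']' hj (List.mem_of_mem_take hmem)
                · obtain ⟨hjlt, ht2, hnoc⟩ := pvFindChar t ']' hj
                  have hmj : (PySem.Chars.find t pvCSV) ≤ (PySem.Chars.find t [']']) := by
                    by_contra hcon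
                    exact hC ⟨hj, Or.inr (by omega)⟩
                  have hmnle : mn ≤ (PySem.Chars.find t [']']).toNat := by
                    have := (pvFind_bound t [']'] hj).1
                    omega
                  have : t.take mn = (t.take (PySem.Chars.find t [']']).toNat).take mn := by
                    rw [List.take_take, Nat.min_eq_left hmnle]
                  rw [this] at hmem
                  exact hnoc (List.mem_of_mem_take hmem)
              have : ([] : List Char) ++ ('[' :: t).take (mn + 1) = '[' :: t.take mn := by simp
              rw [this]
              simpa using pvChunkA_no_close cm data (t.take mn) hnomem
      · rw [if_neg hsw]
        rw [ih (l.drop (kn + 3)) (by simp; omega)]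
        rw [pvHA_first cm data l kn hspec.1 hspec.2]
        rw [pvKA_eq_pvHA cm data (l.drop (kn + 3))
          (pvChunkA_headI_of_not_lb cm data (l.drop (kn + 3)) (Bool.eq_false_iff.2 hsw))]

theorem pvJoinNilFlatten (ps : List (List Char)) :
    PySem.Chars.join [] ps = ps.flatten := by
  induction ps with
  | nil => simp [PySem.Chars.join_nil]
  | cons x r ih =>
    cases r with
    | nil => simp [PySem.Chars.join_singleton]
    | cons y r' =>
      rw [PySem.Chars.join_cons_cons]
      simp [ih]

theorem pvSliceOne (l : List Char) : PySem.List.slice l (some 1) none = l.drop 1 := by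
  simpa using pvSliceFrom l 1

theorem pvPortsEq (text : String) (row_number : Int) (data : List String)
    (cm : List (String × Int)) :
    replace_text_params_with_data text row_number data cm =
      replace_text_params_with_data_alt text row_number data cm := by
  unfold replace_text_params_with_data replace_text_params_with_data_alt
  set u := PySem.Chars.replace text.toList "ROW#".toList (PySem.Int.toChars row_number) with hu
  dsimp only
  rw [pvSplitOn_eq]
  have hS : pvS [] ('!' :: u) = ('!' :: (pvS [] u).headI) :: (pvS [] u).tail := by
    rw [pvS, if_neg (by simp [pvCSV, List.isPrefixOf])]
    rw [show ([] : List Char) ++ ['!'] = ['!'] from rfl]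
    rw [pvS_cons u ['!']]
    simp
  rw [hS, pvProcessChunks_cons]
  have hch : pvChunkA cm data ('!' :: (pvS [] u).headI) = some ('!' :: (pvS [] u).headI) := by
    refine pvChunkA_not_lb cm data _ ?_
    rw [Bool.eq_false_iff]
    intro hcon
    obtain ⟨r, hr⟩ := (pvSingletonPrefix '[' _).1 ((PySem.Chars.startswith_iff _ _).1 hcon)
    injection hr with h1 _
    exact absurd h1 (by decide)
  rw [hch]
  rw [pvMainAux data cm (u.length + 1) u (by omega)]
  unfold pvHA
  cases hp : pvProcessChunks cm data (pvS [] u).tail with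
  | none => simp
  | some ps => simp [pvJoinNilFlatten, pvSliceOne]

-- ===== VERDICT (by name: the statement is the Claim_ definition above) =====
theorem replace_text_params_with_data_spec : Claim_equal_replace_text_params_with_data := by
  intro text row_number data column_mapping _ _
  unfold Spec_replace_text_params_with_data
  exact pvPortsEq text row_number data column_mapping
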